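-- pv_equiv track=rewrite | github.com/sz012/ASD-AGH | Practice/Solved/Random/kol3_2324gh.py | orchard
-- ===== SOURCE A (Python) =====
-- def orchard(T, m):
--     n = len(T)
--     F = [[n] * m for _ in range(n)]
--
--     F[0][0] = 1  # zawsze mogę usunąć pierwsze drzewo
--     F[0][T[0] % m] = 0  # warunek brzegowy - nie wycinam drzew aby otrzymać resztę z 0-drzewa
--
--     for i in range(1, n):
--         for j in range(m):
--             F[i][j] = min(F[i][j], F[i - 1][j] + 1)  # mogę ściąć drzewo
--
--             future_rest = (j + T[i]) % m
--             F[i][future_rest] = min(F[i][future_rest], F[i - 1][j])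
--
--     return F[n - 1][0]
-- ===== SOURCE B (Python) =====
-- def orchard(T, m):
--     # Top-down memoized recursion: f(i, j) = min cuts among the first i trees
--     # so that the kept sum is congruent to j (mod m); INF = n + 1 marks "impossible".
--     n = len(T)
--     INF = n + 1
--     memo = {}
--     def f(i, j):
--         if i == 0:
--             return 0 if j == 0 else INF
--         if (i, j) not in memo:
--             memo[(i, j)] = min(f(i - 1, j) + 1, f(i - 1, (j - T[i - 1]) % m))
--         return memo[(i, j)]
--     return f(n, 0)
-- ===== Notes on version B (the rewrite author's own statement) =====
-- stated objective: alternative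
-- what changed: Replaces A's bottom-up n-by-m table with scatter updates and a hand-initialised base row by a top-down memoized recursion f(i, j) = min cuts among the first i trees to make the kept sum congruent to j (mod m), gathering each state from its unique predecessor residue (j - T[i-1]) % m, with INF = n+1 instead of A's cap-at-n sentinel.
import Mathlib
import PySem

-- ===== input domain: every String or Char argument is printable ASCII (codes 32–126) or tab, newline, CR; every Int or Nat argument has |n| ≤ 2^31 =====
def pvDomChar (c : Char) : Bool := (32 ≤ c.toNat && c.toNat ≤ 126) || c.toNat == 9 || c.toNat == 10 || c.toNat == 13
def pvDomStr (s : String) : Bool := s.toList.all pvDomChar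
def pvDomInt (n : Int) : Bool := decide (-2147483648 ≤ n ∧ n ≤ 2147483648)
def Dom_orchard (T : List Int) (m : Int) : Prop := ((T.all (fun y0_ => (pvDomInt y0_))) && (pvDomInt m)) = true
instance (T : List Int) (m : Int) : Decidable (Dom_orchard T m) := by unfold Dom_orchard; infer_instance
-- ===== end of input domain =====

-- B replaces A's bottom-up n×m min-cut table (scatter updates, cap-n sentinel, hand-made base row)
-- by a top-down memoized recursion f(i,j) = min cuts among the first i trees to reach residue j,
-- gathering from the unique predecessor (j - T[i-1]) % m, with INF = n+1; same asymptotic cost.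

-- ===== PORT A =====
-- body of A's inner j-loop: the two update statements on the table F (row index i)
def orchardInner (T : List Int) (m : Int) (i : Int) (F : List (List Int)) (j : Int) : List (List Int) :=
  let pi := i.toNat
  let row := F.getD pi []
  let row1 := row.set j.toNat (min (row.getD j.toNat 0) ((F.getD (pi - 1) []).getD j.toNat 0 + 1))
  let F1 := F.set pi row1
  let fr := (PySem.Int.mod (j + T.getD pi 0) m).toNat
  let row2 := (F1.getD pi []).set fr (min ((F1.getD pi []).getD fr 0) ((F1.getD (pi - 1) []).getD j.toNat 0))
  F1.set pi row2

def orchard (T : List Int) (m : Int) : Int :=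
  let n : Int := T.length
  let F : List (List Int) := List.replicate n.toNat (List.replicate m.toNat n)
  let F := F.set 0 ((F.getD 0 []).set 0 1)
  let F := F.set 0 ((F.getD 0 []).set (PySem.Int.mod (T.getD 0 0) m).toNat 0)
  let F := (PySem.List.pyRange 1 n 1).foldl
      (fun F i => (PySem.List.pyRange 0 m 1).foldl (orchardInner T m i) F) F
  (F.getD (n - 1).toNat []).getD 0 0

-- ===== PORT B =====
-- f(i, j) with the threaded memo dict; i is the Python recursion depth (always a count, so Nat fuel)
def fMemo (T : List Int) (m : Int) : Nat → Int → PySem.Dict (Int × Int) Int → Int × PySem.Dict (Int × Int) Int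
  | 0, j, memo => ((if j = 0 then 0 else (T.length : Int) + 1), memo)
  | i+1, j, memo =>
    match memo.get? (((i : Int) + 1), j) with
    | some v => (v, memo)
    | none =>
      let p1 := fMemo T m i j memo
      let p2 := fMemo T m i (PySem.Int.mod (j - T.getD i 0) m) p1.2
      let v := min (p1.1 + 1) p2.1
      (v, p2.2.insert (((i : Int) + 1), j) v)

def orchard_alt (T : List Int) (m : Int) : Int :=
  (fMemo T m T.length 0 PySem.Dict.empty).1

-- ===== PRECONDITION & SPEC =====
-- Pre_ excludes exactly the inputs where A raises IndexError: empty T, or m ≤ 0 (empty rows).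
def Pre_orchard (T : List Int) (m : Int) : Prop := T ≠ [] ∧ 1 ≤ m
instance (T : List Int) (m : Int) : Decidable (Pre_orchard T m) := by unfold Pre_orchard; infer_instance
def pvWitness_orchard : List Int × Int := ([2, 3, 4], 3)

def Spec_orchard (T : List Int) (m : Int) (out : Int) : Prop := out = orchard_alt T m
instance (T : List Int) (m : Int) (out : Int) : Decidable (Spec_orchard T m out) := by unfold Spec_orchard; infer_instance

-- ===== CLAIM (what is proved, stated in full; the proofs are below) =====
def Claim_equal_orchard : Prop := ∀ (T : List Int) (m : Int), Dom_orchard T m → Pre_orchard T m → Spec_orchard T m (orchard T m)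

-- ===== LEMMAS AND PROOFS =====

-- ---- small List helpers ----
theorem pvGetD_set_self {α : Type} [Inhabited α] (l : List α) (i : Nat) (h : i < l.length) (v d : α) :
    (l.set i v).getD i d = v := by
  simp [List.getD_eq_getElem?_getD, h]

theorem pvGetD_set_ne {α : Type} [Inhabited α] (l : List α) (i j : Nat) (h : i ≠ j) (v d : α) :
    (l.set i v).getD j d = l.getD j d := by
  simp [List.getD_eq_getElem?_getD, List.getElem?_set_ne h]

theorem pvGetD_replicate {α : Type} [Inhabited α] (k r : Nat) (x d : α) (h : r < k) :
    (List.replicate k x).getD r d = x := by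
  simp [List.getD_eq_getElem?_getD, h]

theorem pvSet_getD_self {α : Type} [Inhabited α] (l : List α) (i : Nat) (h : i < l.length) (d : α) :
    l.set i (l.getD i d) = l := by
  rw [List.getD_eq_getElem?_getD, List.getElem?_eq_getElem h]
  simp only [Option.getD_some]
  exact List.set_getElem_self h

-- ---- mod facts (Python mod, positive modulus) ----
theorem pvMod_bij (m : Int) (hm : 0 < m) (t r k : Int) (hr : 0 ≤ r) (hr2 : r < m)
    (hk : 0 ≤ k) (hk2 : k < m) :
    (PySem.Int.mod (r - t) m = k ↔ r = PySem.Int.mod (k + t) m) := by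
  rw [PySem.Int.mod_eq_emod_of_pos (h := hm), PySem.Int.mod_eq_emod_of_pos (h := hm)]
  constructor
  · intro h
    have e : (k + t) % m = (r - t + t) % m := by rw [← h, Int.emod_add_emod]
    rw [e]
    have e2 : r - t + t = r := by ring
    rw [e2, Int.emod_eq_of_lt hr hr2]
  · intro h
    subst h
    have e : ((k + t) % m - t) % m = (k + t - t) % m := by
      rw [Int.sub_emod, Int.emod_emod_of_dvd _ dvd_rfl, ← Int.sub_emod]
    rw [e]
    have e2 : k + t - t = k := by ring
    rw [e2, Int.emod_eq_of_lt hk hk2]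

theorem pvModIdx_lt (m : Int) (hm : 1 ≤ m) (a : Int) : (PySem.Int.mod a m).toNat < m.toNat := by
  have h1 := PySem.Int.mod_nonneg a (b := m) (by omega)
  have h2 := PySem.Int.mod_lt a (b := m) (by omega)
  omega

-- ---- B's recursion without the memo ----
def fPure (T : List Int) (m : Int) : Nat → Int → Int
  | 0, j => if j = 0 then 0 else (T.length : Int) + 1
  | i+1, j => min (fPure T m i j + 1) (fPure T m i (PySem.Int.mod (j - T.getD i 0) m))

def MemoOK (T : List Int) (m : Int) (memo : PySem.Dict (Int × Int) Int) : Prop :=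
  ∀ (i : Nat) (j v : Int), memo.get? (((i : Int)), j) = some v → v = fPure T m i j

theorem memoOK_empty (T : List Int) (m : Int) : MemoOK T m PySem.Dict.empty := by
  intro i j v h
  rw [PySem.Dict.get?_empty] at h
  exact absurd h (by simp)

theorem fMemo_correct (T : List Int) (m : Int) :
    ∀ (i : Nat) (j : Int) (memo : PySem.Dict (Int × Int) Int), MemoOK T m memo →
      (fMemo T m i j memo).1 = fPure T m i j ∧ MemoOK T m (fMemo T m i j memo).2 := by
  intro i
  induction i with
  | zero =>
    intro j memo hok
    exact ⟨rfl, hok⟩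
  | succ i ih =>
    intro j memo hok
    simp only [fMemo]
    cases h : memo.get? (((i : Int) + 1), j) with
    | some v =>
      have hv : v = fPure T m (i + 1) j := by
        have := hok (i + 1) j v
        apply this
        rw [← h]
        norm_num
      exact ⟨hv, hok⟩
    | none =>
      obtain ⟨h1v, h1ok⟩ := ih j memo hok
      obtain ⟨h2v, h2ok⟩ := ih (PySem.Int.mod (j - T.getD i 0) m) (fMemo T m i j memo).2 h1ok
      constructor
      · simp only [h1v, h2v]
        rfl
      · intro i' j' v' hget
        rw [PySem.Dict.get?_insert] at hget
        by_cases he : ((i' : Int), j') = (((i : Int) + 1), j)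
        · rw [if_pos he] at hget
          have hi : i' = i + 1 := by
            have : (i' : Int) = (i : Int) + 1 := congrArg Prod.fst he
            omega
          have hj : j' = j := congrArg Prod.snd he
          rw [hi, hj]
          have hv' : v' = min ((fMemo T m i j memo).1 + 1)
              ((fMemo T m i (PySem.Int.mod (j - T.getD i 0) m) (fMemo T m i j memo).2).1) := by
            exact (Option.some.injEq _ _ ▸ hget).symm
          rw [hv', h1v, h2v]
          rfl
        · rw [if_neg he] at hget
          exact h2ok i' j' v' hget

theorem fPure_zero_le (T : List Int) (m : Int) : ∀ i : Nat, fPure T m i 0 ≤ (i : Int) := by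
  intro i
  induction i with
  | zero => simp [fPure]
  | succ i ih =>
    have h : fPure T m (i + 1) 0 ≤ fPure T m i 0 + 1 := min_le_left _ _
    push_cast
    omega

-- ---- relation between an A-row (k trees processed) and fPure ----
def RelRow (T : List Int) (m : Int) (k : Nat) (row : List Int) : Prop :=
  row.length = m.toNat ∧ ∀ r : Nat, r < m.toNat →
    row.getD r 0 = min (fPure T m k (r : Int)) (T.length : Int)

-- ---- inner loop: table-level fold reduces to a row-level fold ----
def rowStep (prev : List Int) (t m : Int) (row : List Int) (j : Int) : List Int :=
  let row1 := row.set j.toNat (min (row.getD j.toNat 0) (prev.getD j.toNat 0 + 1))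
  let fr := (PySem.Int.mod (j + t) m).toNat
  row1.set fr (min (row1.getD fr 0) (prev.getD j.toNat 0))

theorem inner_step_set (T : List Int) (m : Int) (i : Int) (F : List (List Int)) (j : Int)
    (h1 : 1 ≤ i.toNat) (h2 : i.toNat < F.length) :
    orchardInner T m i F j =
      F.set i.toNat (rowStep (F.getD (i.toNat - 1) []) (T.getD i.toNat 0) m (F.getD i.toNat []) j) := by
  unfold orchardInner rowStep
  have hne : i.toNat ≠ i.toNat - 1 := by omega
  simp only [pvGetD_set_ne _ _ _ hne, pvGetD_set_self _ _ h2, List.set_set]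

theorem inner_fold_set (T : List Int) (m : Int) (i : Int) (js : List Int) :
    ∀ (F : List (List Int)), 1 ≤ i.toNat → i.toNat < F.length →
    js.foldl (orchardInner T m i) F =
      F.set i.toNat (js.foldl (rowStep (F.getD (i.toNat - 1) []) (T.getD i.toNat 0) m) (F.getD i.toNat [])) := by
  induction js with
  | nil =>
    intro F h1 h2
    simp only [List.foldl_nil]
    rw [pvSet_getD_self _ _ h2]
  | cons j js ih =>
    intro F h1 h2
    simp only [List.foldl_cons]
    rw [inner_step_set T m i F j h1 h2]
    rw [ih _ h1 (by simp [h2])]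
    rw [pvGetD_set_self _ _ h2, pvGetD_set_ne _ _ _ (by omega), List.set_set]

-- ---- row-level fold characterization ----
theorem row_fold_partial (prev : List Int) (t m : Int) (hm : 1 ≤ m) (init : List Int)
    (hlen : init.length = m.toNat) :
    ∀ k : Nat, k ≤ m.toNat →
    ((PySem.List.pyRange 0 (k : Int) 1).foldl (rowStep prev t m) init).length = m.toNat ∧
    ∀ r : Nat, r < m.toNat →
      ((PySem.List.pyRange 0 (k : Int) 1).foldl (rowStep prev t m) init).getD r 0 =
        (if (r : Int) < (k : Int)
         then min (prev.getD r 0 + 1)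
           (if PySem.Int.mod ((r : Int) - t) m < (k : Int)
            then min (prev.getD ((PySem.Int.mod ((r : Int) - t) m).toNat) 0) (init.getD r 0)
            else init.getD r 0)
         else
           (if PySem.Int.mod ((r : Int) - t) m < (k : Int)
            then min (prev.getD ((PySem.Int.mod ((r : Int) - t) m).toNat) 0) (init.getD r 0)
            else init.getD r 0)) := by
  intro k
  induction k with
  | zero =>
    intro _
    rw [PySem.List.pyRange_one_eq_nil (by omega)]
    simp only [List.foldl_nil]
    refine ⟨hlen, ?_⟩
    intro r hr
    have hq := PySem.Int.mod_nonneg ((r : Int) - t) (b := m) (by omega)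
    rw [if_neg (by omega), if_neg (by omega)]
  | succ k ih =>
    intro hk1
    obtain ⟨ihlen, ihval⟩ := ih (by omega)
    have hcast : ((k + 1 : Nat) : Int) = (k : Int) + 1 := by push_cast; ring
    rw [hcast, PySem.List.pyRange_one_succ_right (by omega), List.foldl_append]
    set rowk := (PySem.List.pyRange 0 (k : Int) 1).foldl (rowStep prev t m) init with hrowk
    simp only [List.foldl_cons, List.foldl_nil]
    unfold rowStep
    have hktn : (k : Int).toNat = k := by omega
    simp only [hktn]
    set frN := (PySem.Int.mod ((k : Int) + t) m).toNat with hfrN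
    have hfrlt : frN < m.toNat := pvModIdx_lt m hm _
    have hklt : k < m.toNat := by omega
    set row1 := rowk.set k (min (rowk.getD k 0) (prev.getD k 0 + 1)) with hrow1
    have hrow1len : row1.length = m.toNat := by rw [hrow1]; simp [ihlen]
    refine ⟨by simp [hrow1len], ?_⟩
    intro r hr
    have hbij : (PySem.Int.mod ((r : Int) - t) m = (k : Int)) ↔ (r = frN) := by
      rw [pvMod_bij m (by omega) t r k (by omega) (by omega) (by omega) (by omega)]
      constructor
      · intro h; omega
      · intro h
        have := PySem.Int.mod_nonneg ((k : Int) + t) (b := m) (by omega)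
        omega
    have hqnn := PySem.Int.mod_nonneg ((r : Int) - t) (b := m) (by omega)
    by_cases hrf : r = frN
    · -- r receives the keep-update
      have hq : PySem.Int.mod ((r : Int) - t) m = (k : Int) := hbij.mpr hrf
      have hqt : (PySem.Int.mod ((r : Int) - t) m).toNat = k := by omega
      have e1 : (row1.set frN (min (row1.getD frN 0) (prev.getD k 0))).getD r 0
          = min (row1.getD frN 0) (prev.getD k 0) := by
        rw [hrf]; exact pvGetD_set_self _ _ (by rw [hrow1len]; exact hfrlt) _ _
      rw [e1, hqt]
      by_cases hrk : r = k
      · -- r = k = frN : row1 at frN is the cut-update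
        have e2 : row1.getD frN 0 = min (rowk.getD k 0) (prev.getD k 0 + 1) := by
          rw [hrow1, show frN = k from by omega]
          exact pvGetD_set_self _ _ (by rw [ihlen]; exact hklt) _ _
        rw [e2, ihval k hklt]
        have hqk : PySem.Int.mod ((k : Int) - t) m = (k : Int) := by
          have e := hq; rw [hrk] at e; exact e
        have hqtk : (PySem.Int.mod ((k : Int) - t) m).toNat = k := by omega
        rw [hqtk]
        rw [show prev.getD r 0 = prev.getD k 0 from by rw [hrk],
            show init.getD r 0 = init.getD k 0 from by rw [hrk],
            show ((r : Nat) : Int) = ((k : Nat) : Int) from by rw [hrk]]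
        split_ifs <;> omega
      · -- r = frN ≠ k : row1 at frN = rowk at r
        have e2 : row1.getD frN 0 = rowk.getD r 0 := by
          rw [hrow1, ← hrf]
          exact pvGetD_set_ne _ _ _ (by omega) _ _
        rw [e2, ihval r hr, hqt]
        split_ifs <;> omega
    · -- r does not receive the keep-update
      have hqne : PySem.Int.mod ((r : Int) - t) m ≠ (k : Int) := fun h => hrf (hbij.mp h)
      have e1 : (row1.set frN (min (row1.getD frN 0) (prev.getD k 0))).getD r 0
          = row1.getD r 0 := pvGetD_set_ne _ _ _ (fun h => hrf h.symm) _ _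
      rw [e1]
      by_cases hrk : r = k
      · -- r = k ≠ frN : cut-update only
        have e2 : row1.getD r 0 = min (rowk.getD k 0) (prev.getD k 0 + 1) := by
          rw [hrow1, hrk]
          exact pvGetD_set_self _ _ (by rw [ihlen]; exact hklt) _ _
        rw [e2, ihval k hklt]
        rw [show prev.getD r 0 = prev.getD k 0 from by rw [hrk],
            show init.getD r 0 = init.getD k 0 from by rw [hrk],
            show ((r : Nat) : Int) = ((k : Nat) : Int) from by rw [hrk]]
        rw [show PySem.Int.mod ((k : Int) - t) m = PySem.Int.mod ((r : Int) - t) m from by rw [hrk]]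
        split_ifs <;> omega
      · -- untouched
        have e2 : row1.getD r 0 = rowk.getD r 0 := by
          rw [hrow1]
          exact pvGetD_set_ne _ _ _ (fun h => hrk h.symm) _ _
        rw [e2, ihval r hr]
        have hrki : ((r : Nat) : Int) ≠ ((k : Nat) : Int) := by omega
        split_ifs <;> omega

theorem row_fold_char (prev : List Int) (t m : Int) (hm : 1 ≤ m) (init : List Int)
    (hlen : init.length = m.toNat) :
    ((PySem.List.pyRange 0 m 1).foldl (rowStep prev t m) init).length = m.toNat ∧
    ∀ r : Nat, r < m.toNat →
      ((PySem.List.pyRange 0 m 1).foldl (rowStep prev t m) init).getD r 0 =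
        min (prev.getD r 0 + 1)
          (min (prev.getD ((PySem.Int.mod ((r : Int) - t) m).toNat) 0) (init.getD r 0)) := by
  have hmc : ((m.toNat : Nat) : Int) = m := by omega
  obtain ⟨h1, h2⟩ := row_fold_partial prev t m hm init hlen m.toNat (le_refl _)
  rw [hmc] at h1 h2
  refine ⟨h1, ?_⟩
  intro r hr
  rw [h2 r hr, if_pos (by omega), if_pos (PySem.Int.mod_lt _ (by omega))]

-- ---- one outer step preserves the relation ----
theorem rel_step (T : List Int) (m : Int) (hm : 1 ≤ m) (k : Nat)
    (prev : List Int) (hrel : RelRow T m k prev) :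
    RelRow T m (k + 1)
      ((PySem.List.pyRange 0 m 1).foldl (rowStep prev (T.getD k 0) m)
        (List.replicate m.toNat (T.length : Int))) := by
  obtain ⟨hplen, hpval⟩ := hrel
  obtain ⟨hlen, hval⟩ := row_fold_char prev (T.getD k 0) m hm
    (List.replicate m.toNat (T.length : Int)) (by simp)
  refine ⟨hlen, ?_⟩
  intro r hr
  rw [hval r hr]
  have hxlt : (PySem.Int.mod ((r : Int) - T.getD k 0) m).toNat < m.toNat := pvModIdx_lt m hm _
  rw [hpval r hr, hpval _ hxlt, pvGetD_replicate _ _ _ _ hr]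
  have hnn := PySem.Int.mod_nonneg ((r : Int) - T.getD k 0) (b := m) (by omega)
  have efp : fPure T m (k + 1) (r : Int) =
      min (fPure T m k (r : Int) + 1) (fPure T m k (PySem.Int.mod ((r : Int) - T.getD k 0) m)) := rfl
  rw [efp, show (((PySem.Int.mod ((r : Int) - T.getD k 0) m).toNat : Nat) : Int)
      = PySem.Int.mod ((r : Int) - T.getD k 0) m from by omega]
  omega

-- ---- base row ----
theorem rel_base (T : List Int) (m : Int) (hm : 1 ≤ m) (hT : T ≠ []) :
    RelRow T m 1
      (((List.replicate m.toNat (T.length : Int)).set 0 1).set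
        (PySem.Int.mod (T.getD 0 0) m).toNat 0) := by
  have hn1 : 1 ≤ T.length := by cases T <;> simp_all
  set t0 := T.getD 0 0 with ht0
  set i0 := (PySem.Int.mod t0 m).toNat with hi0
  have hi0lt : i0 < m.toNat := pvModIdx_lt m hm _
  refine ⟨by simp, ?_⟩
  intro r hr
  have hqnn := PySem.Int.mod_nonneg ((r : Int) - t0) (b := m) (by omega)
  have hmodnn := PySem.Int.mod_nonneg t0 (b := m) (by omega)
  have hbij : (PySem.Int.mod ((r : Int) - t0) m = (0 : Int)) ↔ ((r : Int) = PySem.Int.mod t0 m) := by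
    have h := pvMod_bij m (by omega) t0 r 0 (by omega) (by omega) (by omega) (by omega)
    rw [zero_add] at h
    exact h
  have efp : fPure T m 1 (r : Int) =
      min (fPure T m 0 (r : Int) + 1) (fPure T m 0 (PySem.Int.mod ((r : Int) - t0) m)) := rfl
  have e0a : fPure T m 0 (r : Int) = if (r : Int) = 0 then 0 else (T.length : Int) + 1 := rfl
  have e0b : fPure T m 0 (PySem.Int.mod ((r : Int) - t0) m) =
      if PySem.Int.mod ((r : Int) - t0) m = 0 then 0 else (T.length : Int) + 1 := rfl
  by_cases hri : r = i0
  · have eL : (((List.replicate m.toNat (T.length : Int)).set 0 1).set i0 0).getD r 0 = 0 := by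
      rw [hri]; exact pvGetD_set_self _ _ (by simp; omega) _ _
    rw [eL, efp, e0a, e0b, if_pos (hbij.mpr (by omega))]
    split_ifs <;> omega
  · have eL1 : (((List.replicate m.toNat (T.length : Int)).set 0 1).set i0 0).getD r 0 =
        ((List.replicate m.toNat (T.length : Int)).set 0 1).getD r 0 :=
      pvGetD_set_ne _ _ _ (fun h => hri h.symm) _ _
    have hq0 : PySem.Int.mod ((r : Int) - t0) m ≠ 0 := fun h => hri (by have := hbij.mp h; omega)
    rw [eL1, efp, e0a, e0b, if_neg hq0]
    by_cases hr0 : r = 0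
    · have eL2 : ((List.replicate m.toNat (T.length : Int)).set 0 1).getD r 0 = 1 := by
        rw [hr0]; exact pvGetD_set_self _ _ (by simp; omega) _ _
      rw [eL2, if_pos (by omega)]
      omega
    · rw [pvGetD_set_ne _ _ _ (fun h => hr0 h.symm), pvGetD_replicate _ _ _ _ hr,
          if_neg (by omega)]
      omega

-- ---- A's initial table and outer loop invariant ----
def aInit (T : List Int) (m : Int) : List (List Int) :=
  (List.replicate T.length (List.replicate m.toNat (T.length : Int))).set 0
    (((List.replicate m.toNat (T.length : Int)).set 0 1).set
      (PySem.Int.mod (T.getD 0 0) m).toNat 0)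

theorem outer_inv (T : List Int) (m : Int) (hm : 1 ≤ m) (hT : T ≠ []) :
    ∀ k : Nat, k + 1 ≤ T.length →
    ((PySem.List.pyRange 1 ((k + 1 : Nat) : Int) 1).foldl
        (fun F i => (PySem.List.pyRange 0 m 1).foldl (orchardInner T m i) F) (aInit T m)).length = T.length ∧
    (∀ q : Nat, k < q → q < T.length →
      ((PySem.List.pyRange 1 ((k + 1 : Nat) : Int) 1).foldl
        (fun F i => (PySem.List.pyRange 0 m 1).foldl (orchardInner T m i) F) (aInit T m)).getD q [] =
        List.replicate m.toNat (T.length : Int)) ∧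
    RelRow T m (k + 1)
      (((PySem.List.pyRange 1 ((k + 1 : Nat) : Int) 1).foldl
        (fun F i => (PySem.List.pyRange 0 m 1).foldl (orchardInner T m i) F) (aInit T m)).getD k []) := by
  have hn1 : 1 ≤ T.length := by cases T <;> simp_all
  intro k
  induction k with
  | zero =>
    intro _
    rw [show ((0 + 1 : Nat) : Int) = 1 by norm_num,
        PySem.List.pyRange_one_eq_nil (a := 1) (b := 1) le_rfl]
    simp only [List.foldl_nil]
    refine ⟨by simp [aInit], ?_, ?_⟩
    · intro q hq0 hqn
      unfold aInit
      rw [pvGetD_set_ne _ _ _ (by omega), pvGetD_replicate _ _ _ _ hqn]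
    · unfold aInit
      rw [pvGetD_set_self _ _ (by simp; omega)]
      exact rel_base T m hm hT
  | succ k ih =>
    intro hk
    obtain ⟨ihlen, ihrep, ihrel⟩ := ih (by omega)
    have hcast : ((k + 1 + 1 : Nat) : Int) = ((k + 1 : Nat) : Int) + 1 := by push_cast; ring
    rw [hcast, PySem.List.pyRange_one_succ_right (by push_cast; omega), List.foldl_append]
    set G := (PySem.List.pyRange 1 ((k + 1 : Nat) : Int) 1).foldl
      (fun F i => (PySem.List.pyRange 0 m 1).foldl (orchardInner T m i) F) (aInit T m) with hG
    simp only [List.foldl_cons, List.foldl_nil]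
    have hitn : ((k + 1 : Nat) : Int).toNat = k + 1 := by omega
    rw [inner_fold_set T m _ _ G (by omega) (by omega)]
    rw [hitn]
    have hprev : G.getD (k + 1 - 1) [] = G.getD k [] := by norm_num
    have hinit : G.getD (k + 1) [] = List.replicate m.toNat (T.length : Int) :=
      ihrep (k + 1) (by omega) (by omega)
    rw [hprev, hinit]
    have hrel' := rel_step T m hm (k + 1) (G.getD k []) ihrel
    refine ⟨by simp [ihlen], ?_, ?_⟩
    · intro q hq0 hqn
      rw [pvGetD_set_ne _ _ _ (by omega)]
      exact ihrep q (by omega) hqn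
    · rw [pvGetD_set_self _ _ (by omega)]
      exact hrel'

-- ===== VERDICT (by name: the statement is the Claim_ definition above) =====
theorem orchard_spec : Claim_equal_orchard := by
  intro T m _ hpre
  obtain ⟨hT, hm⟩ := hpre
  have hn1 : 1 ≤ T.length := by cases T <;> simp_all
  unfold Spec_orchard
  have horch : orchard T m =
      (((PySem.List.pyRange 1 ((T.length : Nat) : Int) 1).foldl
        (fun F i => (PySem.List.pyRange 0 m 1).foldl (orchardInner T m i) F) (aInit T m)).getD
          (T.length - 1) []).getD 0 0 := by
    unfold orchard aInit
    simp only [Int.toNat_natCast]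
    rw [pvGetD_replicate _ _ _ _ (by omega), List.set_set]
    rw [show ((T.length : Int) - 1).toNat = T.length - 1 from by omega]
    rw [pvGetD_set_self _ _ (by simp; omega)]
  rw [horch]
  obtain ⟨_, _, hrel⟩ := outer_inv T m hm hT (T.length - 1) (by omega)
  rw [show (T.length - 1) + 1 = T.length from by omega] at hrel
  obtain ⟨_, hval⟩ := hrel
  rw [hval 0 (by omega)]
  have halt : orchard_alt T m = fPure T m T.length 0 :=
    (fMemo_correct T m T.length 0 PySem.Dict.empty (memoOK_empty T m)).1
  rw [halt]
  have hle := fPure_zero_le T m T.length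
  push_cast
  omega
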